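-- pv_equiv track=rewrite | github.com/JacobEnder/SimplicialHomology | cycle_detection.py | detect_4_cycles
-- ===== SOURCE A (Python) =====
-- def detect_4_cycles(adj):
--     """
--     Detect and report 4-cycles in a graph.
--
--     Parameters:
--     - adj: dict
--         A dictionary representing the adjacency list of an undirected graph.
--         Keys are vertices (comparable: e.g., integers or strings), and values
--         are iterables of neighboring vertices.
--
--     Returns:
--     - cycles: list of tuples
--         A list of tuples (v, u, v', w) representing each 4-cycle found,
--         corresponding to the cycle v - u - v' - w - v. Each 4-cycle is reported once.
--     """
--     # Convert adjacency lists into sets for O(1) neighbor checks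
--     neighbors = {v: set(adj[v]) for v in adj}
--     seen = set()   # to record which 4-vertex sets we've already reported
--     cycles = []
--
--     # Sort vertices to enforce an order
--     vertices = sorted(neighbors)
--
--     # Look at every unordered pair (v, v') with v < v' and no edge between them
--     for i in range(len(vertices)):
--         v = vertices[i]
--         for j in range(i+1, len(vertices)):
--             v_prime = vertices[j]
--             if v_prime in neighbors[v]:
--                 continue  # skip if there's an edge v--v'
--
--             # Find common neighbors of v and v'
--             common = neighbors[v].intersection(neighbors[v_prime])
--             # If fewer than 2 common neighbors, we can't form a 4-cycle this way
--             if len(common) < 2: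
--                 continue
--
--             # Sort common neighbors so we can pick pairs (u, w) with u < w
--             sorted_common = sorted(common)
--             for x in range(len(sorted_common)):
--                 u = sorted_common[x]
--                 for y in range(x+1, len(sorted_common)):
--                     w = sorted_common[y]
--                     # Now {v, u, v', w} is a candidate 4-cycle
--                     cycle_set = frozenset({v, u, v_prime, w})
--                     if cycle_set not in seen:
--                         seen.add(cycle_set)
--                         # We append it in the order v - u - v' - w
--                         cycles.append((v, u, v_prime, w))
--
--     return cycles
-- ===== SOURCE B (Python) =====
-- def detect_4_cycles(adj):
--     """Same result as the original, but common-neighbor lists are precomputed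
--     once by wedge (length-2 path) enumeration instead of a set intersection
--     for every vertex pair."""
--     neighbors = {v: set(adj[v]) for v in adj}
--     vertices = sorted(neighbors)
--
--     # bucket[c] = all vertices v (in ascending order) having c as a neighbor
--     bucket = {}
--     for v in vertices:
--         for c in neighbors[v]:
--             bucket.setdefault(c, []).append(v)
--
--     # wedge enumeration: every pair (v, v') of distinct vertices in bucket[c]
--     # has c as a common neighbor
--     pair_common = {}
--     for c, vs in bucket.items():
--         for i in range(len(vs)):
--             for j in range(i + 1, len(vs)):
--                 pair_common.setdefault((vs[i], vs[j]), []).append(c)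
--
--     seen = set()
--     cycles = []
--     for i in range(len(vertices)):
--         v = vertices[i]
--         for j in range(i + 1, len(vertices)):
--             v_prime = vertices[j]
--             if v_prime in neighbors[v]:
--                 continue
--             common = sorted(pair_common.get((v, v_prime), ()))
--             for x in range(len(common)):
--                 u = common[x]
--                 for y in range(x + 1, len(common)):
--                     w = common[y]
--                     cycle_set = frozenset({v, u, v_prime, w})
--                     if cycle_set not in seen:
--                         seen.add(cycle_set)
--                         cycles.append((v, u, v_prime, w))
--     return cycles
-- ===== Notes on version B (the rewrite author's own statement) =====
-- stated objective: alternative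
-- what changed: B precomputes the common-neighbor list of every vertex pair once by wedge (length-2 path) enumeration through a reverse-neighbor bucket, so the per-pair neighbor-set intersection of A disappears; the pair iteration order and dedup are unchanged, so the output is identical.
import Mathlib
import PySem

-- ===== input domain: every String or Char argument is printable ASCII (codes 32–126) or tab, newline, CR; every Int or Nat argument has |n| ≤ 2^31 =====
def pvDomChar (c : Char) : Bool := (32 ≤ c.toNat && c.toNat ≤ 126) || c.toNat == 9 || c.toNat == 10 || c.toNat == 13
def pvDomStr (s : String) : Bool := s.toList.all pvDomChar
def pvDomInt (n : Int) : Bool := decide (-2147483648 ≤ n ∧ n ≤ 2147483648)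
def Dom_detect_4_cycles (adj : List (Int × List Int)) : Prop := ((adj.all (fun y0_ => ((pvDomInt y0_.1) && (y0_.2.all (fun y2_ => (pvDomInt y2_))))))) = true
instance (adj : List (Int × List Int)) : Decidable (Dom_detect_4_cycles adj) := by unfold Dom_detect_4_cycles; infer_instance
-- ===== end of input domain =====

-- B replaces the per-pair set intersection by common-neighbor lists precomputed once
-- via wedge (length-2 path) enumeration; the output is identical.

-- ===== SHARED HELPERS (lines both Pythons contain verbatim) =====

-- frozenset({…}) of ints, in canonical form (sorted distinct elements):
-- two frozensets are equal iff their canonical lists are equal.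
def pvCanon (l : List Int) : List Int := PySem.List.sorted (PySem.Set.ofList l) (fun x => x)

-- running state of the reporting loops: (seen, cycles)
abbrev PvSt := PySem.Set (List Int) × List (Int × Int × Int × Int)

-- 'for y in range(x+1, len(sorted_common)): w = …; if cycle_set not in seen: …'
def pvEmitInner (v vp u : Int) (ws : List Int) (st : PvSt) : PvSt :=
  ws.foldl (fun st w =>
    let cycle_set := pvCanon [v, u, vp, w]
    if PySem.Set.contains st.1 cycle_set then st
    else (PySem.Set.add st.1 cycle_set, st.2 ++ [(v, u, vp, w)])) st

-- 'for x in range(len(sorted_common)): u = sorted_common[x]; …'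
def pvEmit (v vp : Int) : List Int → PvSt → PvSt
  | [], st => st
  | u :: rest, st => pvEmit v vp rest (pvEmitInner v vp u rest st)

-- 'neighbors = {v: set(adj[v]) for v in adj}'
def pvNeighbors (adj : List (Int × List Int)) : PySem.Dict Int (PySem.Set Int) :=
  let d := PySem.Dict.ofList adj
  (PySem.Dict.keys d).foldl
    (fun nb v => nb.insert v (PySem.Set.ofList (d.getD v []))) PySem.Dict.empty

-- 'vertices = sorted(neighbors)'
def pvVertices (nb : PySem.Dict Int (PySem.Set Int)) : List Int :=
  PySem.List.sorted (PySem.Dict.keys nb) (fun x => x)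

-- ===== PORT A =====

-- loop body for one pair (v, v'): skip if adjacent, intersect neighbor sets,
-- skip if fewer than 2 common neighbors, else report new 4-sets
def pvBodyA (nb : PySem.Dict Int (PySem.Set Int)) (v vp : Int) (st : PvSt) : PvSt :=
  if PySem.Set.contains (nb.getD v []) vp then st
  else if PySem.Set.len (PySem.Set.inter (nb.getD v []) (nb.getD vp [])) < 2 then st
  else pvEmit v vp (PySem.List.sorted (PySem.Set.inter (nb.getD v []) (nb.getD vp [])) (fun x => x)) st

-- 'for i in range(len(vertices)): for j in range(i+1, len(vertices)): …'
def pvLoopA (nb : PySem.Dict Int (PySem.Set Int)) : List Int → PvSt → PvSt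
  | [], st => st
  | v :: rest, st => pvLoopA nb rest (rest.foldl (fun st vp => pvBodyA nb v vp st) st)

def detect_4_cycles (adj : List (Int × List Int)) : List (Int × Int × Int × Int) :=
  let nb := pvNeighbors adj
  (pvLoopA nb (pvVertices nb) (PySem.Set.empty, [])).2

-- ===== PORT B =====

-- 'for v in vertices: for c in neighbors[v]: bucket.setdefault(c, []).append(v)'
def pvBucket (nb : PySem.Dict Int (PySem.Set Int)) (vertices : List Int) :
    PySem.Dict Int (List Int) :=
  vertices.foldl
    (fun bk v => (nb.getD v []).foldl (fun bk c => bk.modify c [] (· ++ [v])) bk)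
    PySem.Dict.empty

-- 'for i in range(len(vs)): for j in range(i+1, len(vs)): pair_common.setdefault((vs[i], vs[j]), []).append(c)'
def pvWedges (c : Int) : List Int → PySem.Dict (Int × Int) (List Int) → PySem.Dict (Int × Int) (List Int)
  | [], pc => pc
  | v :: rest, pc => pvWedges c rest (rest.foldl (fun pc vp => pc.modify (v, vp) [] (· ++ [c])) pc)

-- 'for c, vs in bucket.items(): …'
def pvPairCommon (bucket : PySem.Dict Int (List Int)) : PySem.Dict (Int × Int) (List Int) :=
  bucket.items.foldl (fun pc cv => pvWedges cv.1 cv.2 pc) PySem.Dict.empty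

-- pair body of B: skip if adjacent, else report from the precomputed common list
def pvBodyB (nb : PySem.Dict Int (PySem.Set Int)) (pc : PySem.Dict (Int × Int) (List Int))
    (v vp : Int) (st : PvSt) : PvSt :=
  if PySem.Set.contains (nb.getD v []) vp then st
  else pvEmit v vp (PySem.List.sorted (pc.getD (v, vp) []) (fun x => x)) st

def pvLoopB (nb : PySem.Dict Int (PySem.Set Int)) (pc : PySem.Dict (Int × Int) (List Int)) :
    List Int → PvSt → PvSt
  | [], st => st
  | v :: rest, st => pvLoopB nb pc rest (rest.foldl (fun st vp => pvBodyB nb pc v vp st) st)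

def detect_4_cycles_alt (adj : List (Int × List Int)) : List (Int × Int × Int × Int) :=
  let nb := pvNeighbors adj
  let vertices := pvVertices nb
  let pc := pvPairCommon (pvBucket nb vertices)
  (pvLoopB nb pc vertices (PySem.Set.empty, [])).2

-- ===== PRECONDITION & SPEC =====
def Spec_detect_4_cycles (adj : List (Int × List Int)) (out : List (Int × Int × Int × Int)) : Prop := out = detect_4_cycles_alt adj
instance (adj : List (Int × List Int)) (out : List (Int × Int × Int × Int)) : Decidable (Spec_detect_4_cycles adj out) := by unfold Spec_detect_4_cycles; infer_instance

-- ===== CLAIM (what is proved, stated in full; the proofs are below) =====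
def Claim_equal_detect_4_cycles : Prop := ∀ (adj : List (Int × List Int)), Dom_detect_4_cycles adj → Spec_detect_4_cycles adj (detect_4_cycles adj)

-- ===== LEMMAS AND PROOFS =====

-- pairs (l[i], l[j]) with i < j, in the order of the tails double loop
def pvTailPairs : List Int → List (Int × Int)
  | [] => []
  | v :: rest => rest.map (fun vp => (v, vp)) ++ pvTailPairs rest

theorem pvTailPairs_mem {a b : Int} : ∀ {l : List Int},
    (a, b) ∈ pvTailPairs l → a ∈ l ∧ b ∈ l := by
  intro l
  induction l with
  | nil => simp [pvTailPairs]
  | cons v rest ih =>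
    intro h
    simp only [pvTailPairs, List.mem_append, List.mem_map] at h
    rcases h with ⟨vp, hvp, heq⟩ | h
    · obtain ⟨rfl, rfl⟩ := Prod.mk.inj heq
      exact ⟨List.mem_cons_self, List.mem_cons_of_mem _ hvp⟩
    · exact ⟨List.mem_cons_of_mem _ (ih h).1, List.mem_cons_of_mem _ (ih h).2⟩

theorem pvTailPairs_mem_iff {a b : Int} {l : List Int} (hs : l.Pairwise (· < ·)) :
    (a, b) ∈ pvTailPairs l ↔ a ∈ l ∧ b ∈ l ∧ a < b := by
  induction l with
  | nil => simp [pvTailPairs]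
  | cons v rest ih =>
    rcases hs with _ | ⟨hv, hrest⟩
    constructor
    · intro h
      simp only [pvTailPairs, List.mem_append, List.mem_map] at h
      rcases h with ⟨vp, hvp, heq⟩ | h
      · obtain ⟨rfl, rfl⟩ := Prod.mk.inj heq
        exact ⟨List.mem_cons_self, List.mem_cons_of_mem _ hvp, hv _ hvp⟩
      · obtain ⟨ha, hb, hab⟩ := (ih hrest).1 h
        exact ⟨List.mem_cons_of_mem _ ha, List.mem_cons_of_mem _ hb, hab⟩
    · rintro ⟨ha, hb, hab⟩
      simp only [pvTailPairs, List.mem_append, List.mem_map]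
      rcases List.mem_cons.1 ha with rfl | ha'
      · rcases List.mem_cons.1 hb with rfl | hb'
        · exact absurd hab (lt_irrefl _)
        · exact Or.inl ⟨b, hb', rfl⟩
      · rcases List.mem_cons.1 hb with rfl | hb'
        · exact absurd (lt_trans (hv _ ha') hab) (lt_irrefl _)
        · exact Or.inr ((ih hrest).2 ⟨ha', hb', hab⟩)

theorem pvTailPairs_nodup {l : List Int} (hs : l.Pairwise (· < ·)) :
    (pvTailPairs l).Nodup := by
  induction l with
  | nil => simp [pvTailPairs]
  | cons v rest ih =>
    rcases hs with _ | ⟨hv, hrest⟩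
    simp only [pvTailPairs]
    apply List.Nodup.append
    · exact (List.Pairwise.imp (fun h => h.ne) hrest).map _ (by
        intro x y hne hxy; exact hne (Prod.mk.inj hxy).2)
    · exact ih hrest
    · intro p hp hp2
      obtain ⟨vp, hvp, rfl⟩ := List.mem_map.1 hp
      exact absurd (hv _ (pvTailPairs_mem hp2).1) (lt_irrefl v)

-- getD through a fold of inserts whose values do not depend on the accumulator
theorem pv_getD_foldl_insert {κ ν : Type} [BEq κ] [LawfulBEq κ] [DecidableEq κ]
    (l : List κ) (f : κ → ν) (d0 : PySem.Dict κ ν) (k : κ) (df : ν) :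
    (l.foldl (fun d v => d.insert v (f v)) d0).getD k df
      = if k ∈ l then f k else d0.getD k df := by
  induction l generalizing d0 with
  | nil => simp
  | cons v rest ih =>
    simp only [List.foldl_cons, ih, PySem.Dict.getD_insert, List.mem_cons]
    by_cases h1 : k ∈ rest <;> by_cases h2 : k = v <;> simp [h1, h2]

-- filter a tagged copy of a duplicate-free list down to one element
theorem pv_filter_map_tag {α β : Type} [BEq α] [LawfulBEq α] [DecidableEq α]
    (S : List α) (t : β) (s : α) (hS : S.Nodup) :
    (S.map (fun x => (x, t))).filter (fun p => p.1 == s)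
      = if s ∈ S then [(s, t)] else [] := by
  induction S with
  | nil => simp
  | cons x rest ih =>
    rcases hS with _ | ⟨hx, hrest⟩
    simp only [List.map_cons, List.filter_cons, List.mem_cons]
    by_cases h2 : x = s
    · subst h2
      have : x ∉ rest := fun h => (hx x h) rfl
      simp [ih hrest, this]
    · have hb : (x == s) = false := by simp [h2]
      simp only [hb, Bool.false_eq_true, if_false, ih hrest]
      by_cases h1 : s ∈ rest <;> simp [h1, Ne.symm h2]

-- the tagged-flatMap/filter shape shared by bucket and pair_common
theorem pv_flatMap_filter {α β γ : Type} [BEq α] [LawfulBEq α] [DecidableEq α]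
    (s : α) (g : β → List α) (t : β → γ) :
    ∀ (L : List β), (∀ x ∈ L, (g x).Nodup) →
    ((L.flatMap (fun x => (g x).map (fun c => (c, t x)))).filter (fun p => p.1 == s)).map (·.2)
      = (L.filter (fun x => decide (s ∈ g x))).map t := by
  intro L
  induction L with
  | nil => simp
  | cons x rest ih =>
    intro h
    simp only [List.flatMap_cons, List.filter_append, List.map_append, List.filter_cons]
    rw [pv_filter_map_tag (g x) (t x) s (h x List.mem_cons_self),
        ih (fun y hy => h y (List.mem_cons_of_mem _ hy))]
    by_cases hs : s ∈ g x <;> simp [hs]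

-- ===== facts about the shared data =====

theorem pvNeighbors_getD (adj : List (Int × List Int)) (v : Int) :
    (pvNeighbors adj).getD v []
      = if v ∈ (PySem.Dict.ofList adj).keys
        then PySem.Set.ofList ((PySem.Dict.ofList adj).getD v []) else [] := by
  unfold pvNeighbors
  rw [pv_getD_foldl_insert]
  by_cases h : v ∈ (PySem.Dict.ofList adj).keys <;>
    simp [h, PySem.Dict.getD_empty]

theorem pvNeighbors_keys_nodup (adj : List (Int × List Int)) :
    (pvNeighbors adj).keys.Nodup := by
  unfold pvNeighbors
  exact PySem.Dict.nodup_keys_foldl_insert _ _ _ PySem.Dict.nodup_keys_empty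

theorem pvVertices_nodup (adj : List (Int × List Int)) :
    (pvVertices (pvNeighbors adj)).Nodup := by
  exact (PySem.List.sorted_perm _ _ _).nodup_iff.2 (pvNeighbors_keys_nodup adj)

theorem pvVertices_sorted (adj : List (Int × List Int)) :
    (pvVertices (pvNeighbors adj)).Pairwise (· < ·) := by
  have h1 := PySem.List.sorted_pairwise (PySem.Dict.keys (pvNeighbors adj)) (fun x => x)
  have h2 := pvVertices_nodup adj
  exact (h1.and h2).imp (fun h => lt_of_le_of_ne h.1 h.2)

theorem pvNeighbors_getD_nodup (adj : List (Int × List Int)) (v : Int) :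
    ((pvNeighbors adj).getD v []).Nodup := by
  rw [pvNeighbors_getD]
  by_cases h : v ∈ (PySem.Dict.ofList adj).keys <;> simp [h, PySem.Set.nodup_ofList]

-- ===== the bucket =====

theorem pvBucket_eq_foldl (nb : PySem.Dict Int (PySem.Set Int)) (vertices : List Int) :
    pvBucket nb vertices
      = (vertices.flatMap (fun v => (nb.getD v []).map (fun c => (c, v)))).foldl
          (fun d p => d.modify p.1 [] (· ++ [p.2])) PySem.Dict.empty := by
  unfold pvBucket
  rw [List.foldl_flatMap]
  simp only [List.foldl_map]

theorem pvBucket_getD (adj : List (Int × List Int)) (c : Int) :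
    (pvBucket (pvNeighbors adj) (pvVertices (pvNeighbors adj))).getD c []
      = (pvVertices (pvNeighbors adj)).filter
          (fun v => decide (c ∈ (pvNeighbors adj).getD v [])) := by
  rw [pvBucket_eq_foldl, PySem.Dict.getD_foldl_modify_append, PySem.Dict.getD_empty,
      List.nil_append]
  have h := pv_flatMap_filter c (fun v => (pvNeighbors adj).getD v []) (fun v : Int => v)
    (pvVertices (pvNeighbors adj)) (fun v _ => pvNeighbors_getD_nodup adj v)
  simpa using h

theorem pvBucket_keys_nodup (adj : List (Int × List Int)) :
    (pvBucket (pvNeighbors adj) (pvVertices (pvNeighbors adj))).keys.Nodup := by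
  rw [pvBucket_eq_foldl]
  rw [PySem.Dict.keys_foldl_modify_key _ Prod.fst [] (fun d p => fun x => x ++ [p.2])]
  simp only [PySem.Dict.keys_empty, PySem.Set.update_nil_left]
  exact PySem.Set.nodup_ofList _

theorem pvBucket_mem_keys (adj : List (Int × List Int)) (c : Int) :
    c ∈ (pvBucket (pvNeighbors adj) (pvVertices (pvNeighbors adj))).keys
      ↔ ∃ v ∈ pvVertices (pvNeighbors adj), c ∈ (pvNeighbors adj).getD v [] := by
  rw [pvBucket_eq_foldl]
  rw [PySem.Dict.keys_foldl_modify_key _ Prod.fst [] (fun d p => fun x => x ++ [p.2])]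
  simp only [PySem.Dict.keys_empty, PySem.Set.update_nil_left, PySem.Set.mem_ofList,
    List.mem_map, List.mem_flatMap]
  constructor
  · rintro ⟨p, ⟨v, hv, c', hc', rfl⟩, rfl⟩
    exact ⟨v, hv, hc'⟩
  · rintro ⟨v, hv, hc⟩
    exact ⟨(c, v), ⟨v, hv, c, hc, rfl⟩, rfl⟩

-- every value stored in the bucket is an ascending vertex list
theorem pvBucket_getD_sorted (adj : List (Int × List Int)) (c : Int) :
    ((pvBucket (pvNeighbors adj) (pvVertices (pvNeighbors adj))).getD c []).Pairwise (· < ·) := by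
  rw [pvBucket_getD]
  exact (pvVertices_sorted adj).filter _

theorem pvBucket_items_sorted (adj : List (Int × List Int)) {cv : Int × List Int}
    (h : cv ∈ (pvBucket (pvNeighbors adj) (pvVertices (pvNeighbors adj))).items) :
    cv.2.Pairwise (· < ·) := by
  obtain ⟨c, vs⟩ := cv
  have := PySem.Dict.getD_of_mem_items _ h (pvBucket_keys_nodup adj) []
  rw [← this]
  exact pvBucket_getD_sorted adj c

-- ===== pair_common =====

theorem pvWedges_eq (c : Int) : ∀ (vs : List Int) (pc : PySem.Dict (Int × Int) (List Int)),
    pvWedges c vs pc = (pvTailPairs vs).foldl (fun pc q => pc.modify q [] (· ++ [c])) pc := by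
  intro vs
  induction vs with
  | nil => intro pc; rfl
  | cons v rest ih =>
    intro pc
    simp only [pvWedges, pvTailPairs, List.foldl_append, List.foldl_map, ih]

theorem pvPairCommon_eq_foldl (bucket : PySem.Dict Int (List Int)) :
    pvPairCommon bucket
      = (bucket.items.flatMap (fun cv => (pvTailPairs cv.2).map (fun q => (q, cv.1)))).foldl
          (fun d p => d.modify p.1 [] (· ++ [p.2])) PySem.Dict.empty := by
  unfold pvPairCommon
  rw [List.foldl_flatMap]
  simp only [List.foldl_map, pvWedges_eq]

theorem pvPairCommon_getD (adj : List (Int × List Int)) (v vp : Int) :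
    (pvPairCommon (pvBucket (pvNeighbors adj) (pvVertices (pvNeighbors adj)))).getD (v, vp) []
      = ((pvBucket (pvNeighbors adj) (pvVertices (pvNeighbors adj))).items.filter
          (fun cv => decide ((v, vp) ∈ pvTailPairs cv.2))).map (·.1) := by
  rw [pvPairCommon_eq_foldl, PySem.Dict.getD_foldl_modify_append, PySem.Dict.getD_empty,
      List.nil_append]
  exact pv_flatMap_filter (v, vp) (fun cv => pvTailPairs cv.2) (·.1) _
    (fun cv hcv => pvTailPairs_nodup (pvBucket_items_sorted adj hcv))

theorem pvPairCommon_getD_nodup (adj : List (Int × List Int)) (v vp : Int) :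
    ((pvPairCommon (pvBucket (pvNeighbors adj) (pvVertices (pvNeighbors adj)))).getD (v, vp) []).Nodup := by
  rw [pvPairCommon_getD]
  have hsub : (((pvBucket (pvNeighbors adj) (pvVertices (pvNeighbors adj))).items.filter
      (fun cv => decide ((v, vp) ∈ pvTailPairs cv.2))).map (·.1)).Sublist
      ((pvBucket (pvNeighbors adj) (pvVertices (pvNeighbors adj))).items.map (·.1)) :=
    List.Sublist.map (fun cv : Int × List Int => cv.1) List.filter_sublist
  have hkeys := pvBucket_keys_nodup adj
  simp only [PySem.Dict.keys] at hkeys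
  exact hkeys.sublist hsub

theorem pvPairCommon_getD_mem (adj : List (Int × List Int)) (v vp c : Int)
    (hv : v ∈ pvVertices (pvNeighbors adj)) (hvp : vp ∈ pvVertices (pvNeighbors adj))
    (hlt : v < vp) :
    c ∈ (pvPairCommon (pvBucket (pvNeighbors adj) (pvVertices (pvNeighbors adj)))).getD (v, vp) []
      ↔ c ∈ (pvNeighbors adj).getD v [] ∧ c ∈ (pvNeighbors adj).getD vp [] := by
  rw [pvPairCommon_getD]
  simp only [List.mem_map, List.mem_filter, decide_eq_true_eq]
  constructor
  · rintro ⟨⟨c', vs⟩, ⟨hmem, hpair⟩, rfl⟩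
    have hvs := PySem.Dict.getD_of_mem_items _ hmem (pvBucket_keys_nodup adj) []
    have hmemv := pvTailPairs_mem hpair
    rw [← hvs, pvBucket_getD] at hmemv
    obtain ⟨h1, h2⟩ := hmemv
    exact ⟨(List.mem_filter.1 h1).2 |> (by simp : _ → _),
           (List.mem_filter.1 h2).2 |> (by simp : _ → _)⟩
  · rintro ⟨hcv, hcvp⟩
    have hkey : c ∈ (pvBucket (pvNeighbors adj) (pvVertices (pvNeighbors adj))).keys :=
      (pvBucket_mem_keys adj c).2 ⟨v, hv, hcv⟩
    set bk := pvBucket (pvNeighbors adj) (pvVertices (pvNeighbors adj)) with hbk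
    obtain ⟨vs, hvs⟩ : ∃ vs, bk.get? c = some vs := by
      cases h : bk.get? c with
      | none => exact absurd ((PySem.Dict.get?_eq_none_iff_not_mem_keys bk c).1 h) (by simp [hkey])
      | some vs => exact ⟨vs, rfl⟩
    have hitems : (c, vs) ∈ bk.items :=
      (PySem.Dict.get?_eq_some_iff_mem_items bk c vs (pvBucket_keys_nodup adj)).1 hvs
    refine ⟨(c, vs), ⟨hitems, ?_⟩, rfl⟩
    have hvseq : bk.getD c [] = vs := by rw [PySem.Dict.getD_eq_get?_getD, hvs]; rfl
    have hsorted : vs.Pairwise (· < ·) := by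
      rw [← hvseq]; exact pvBucket_getD_sorted adj c
    rw [pvTailPairs_mem_iff hsorted]
    have hvmem : v ∈ vs := by
      rw [← hvseq, hbk, pvBucket_getD]
      exact List.mem_filter.2 ⟨hv, by simp [hcv]⟩
    have hvpmem : vp ∈ vs := by
      rw [← hvseq, hbk, pvBucket_getD]
      exact List.mem_filter.2 ⟨hvp, by simp [hcvp]⟩
    exact ⟨hvmem, hvpmem, hlt⟩

-- ===== the two bodies agree on ordered vertex pairs =====

theorem pvEmit_short (v vp : Int) (l : List Int) (h : l.length < 2) (st : PvSt) :
    pvEmit v vp l st = st := by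
  match l, h with
  | [], _ => rfl
  | [u], _ => rfl

theorem pvBody_eq (adj : List (Int × List Int)) (v vp : Int)
    (hv : v ∈ pvVertices (pvNeighbors adj)) (hvp : vp ∈ pvVertices (pvNeighbors adj))
    (hlt : v < vp) (st : PvSt) :
    pvBodyA (pvNeighbors adj) v vp st
      = pvBodyB (pvNeighbors adj)
          (pvPairCommon (pvBucket (pvNeighbors adj) (pvVertices (pvNeighbors adj)))) v vp st := by
  unfold pvBodyA pvBodyB
  by_cases hadj : PySem.Set.contains ((pvNeighbors adj).getD v []) vp = true
  · rw [if_pos hadj, if_pos hadj]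
  · rw [if_neg hadj, if_neg hadj]
    have hperm : ((pvPairCommon (pvBucket (pvNeighbors adj) (pvVertices (pvNeighbors adj)))).getD (v, vp) []).Perm
        (PySem.Set.inter ((pvNeighbors adj).getD v []) ((pvNeighbors adj).getD vp [])) := by
      rw [List.perm_ext_iff_of_nodup (pvPairCommon_getD_nodup adj v vp)
        (PySem.Set.nodup_inter _ _ (pvNeighbors_getD_nodup adj v))]
      intro c
      rw [pvPairCommon_getD_mem adj v vp c hv hvp hlt, PySem.Set.mem_inter]
    have hsorteq : PySem.List.sorted
        ((pvPairCommon (pvBucket (pvNeighbors adj) (pvVertices (pvNeighbors adj)))).getD (v, vp) []) (fun x => x)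
        = PySem.List.sorted
            (PySem.Set.inter ((pvNeighbors adj).getD v []) ((pvNeighbors adj).getD vp [])) (fun x => x) := by
      symm
      apply PySem.List.sorted_eq_of_perm_of_pairwise_lt
      · exact (PySem.List.sorted_perm _ (fun x => x) false).trans hperm
      · have hnd : (PySem.List.sorted
            ((pvPairCommon (pvBucket (pvNeighbors adj) (pvVertices (pvNeighbors adj)))).getD (v, vp) [])
            (fun x => x)).Nodup :=
          (PySem.List.sorted_perm _ (fun x => x) false).nodup_iff.2
            (pvPairCommon_getD_nodup adj v vp)
        exact ((PySem.List.sorted_pairwise _ (fun x => x)).and hnd).imp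
          (fun h => lt_of_le_of_ne h.1 h.2)
    rw [hsorteq]
    by_cases hlen : PySem.Set.len
        (PySem.Set.inter ((pvNeighbors adj).getD v []) ((pvNeighbors adj).getD vp [])) < 2
    · rw [if_pos hlen]
      have hl2 : (PySem.List.sorted
          (PySem.Set.inter ((pvNeighbors adj).getD v []) ((pvNeighbors adj).getD vp []))
          (fun x => x)).length < 2 := by
        rw [(PySem.List.sorted_perm _ (fun x => x) false).length_eq]
        simp only [PySem.Set.len] at hlen
        omega
      exact (pvEmit_short v vp _ hl2 st).symm
    · rw [if_neg hlen]

theorem pvLoop_eq (adj : List (Int × List Int)) :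
    ∀ (l : List Int), l ⊆ pvVertices (pvNeighbors adj) → l.Pairwise (· < ·) →
    ∀ st, pvLoopA (pvNeighbors adj) l st
      = pvLoopB (pvNeighbors adj)
          (pvPairCommon (pvBucket (pvNeighbors adj) (pvVertices (pvNeighbors adj)))) l st := by
  intro l
  induction l with
  | nil => intro _ _ st; rfl
  | cons v rest ih =>
    intro hsub hpw st
    rcases hpw with _ | ⟨hv, hrest⟩
    simp only [pvLoopA, pvLoopB]
    rw [PySem.List.foldl_congr_mem rest _ _ st
      (fun acc vp hvp => pvBody_eq adj v vp (hsub List.mem_cons_self)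
        (hsub (List.mem_cons_of_mem _ hvp)) (hv vp hvp) acc)]
    exact ih (fun x hx => hsub (List.mem_cons_of_mem _ hx)) hrest _

-- ===== VERDICT (by name: the statement is the Claim_ definition above) =====
theorem detect_4_cycles_spec : Claim_equal_detect_4_cycles := by
  intro adj _
  unfold Spec_detect_4_cycles detect_4_cycles detect_4_cycles_alt
  show (pvLoopA (pvNeighbors adj) (pvVertices (pvNeighbors adj)) (PySem.Set.empty, [])).2
      = (pvLoopB (pvNeighbors adj)
          (pvPairCommon (pvBucket (pvNeighbors adj) (pvVertices (pvNeighbors adj))))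
          (pvVertices (pvNeighbors adj)) (PySem.Set.empty, [])).2
  rw [pvLoop_eq adj _ (fun _ h => h) (pvVertices_sorted adj)]
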